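/- GENERATED by mk_final_copies.py from the proof of the farm's unit `decode_residue.3` (farm:decode_residue.3.1: Lemmas.lean) as the
   re-elaboration sweep compiled it — do not edit. -/
import Asan.CheckWalk
import Vorbis.Spec.Units.decode_residue_3

/-!
  Lemmas of the proof unit `decode_residue.3` (path A control of `decode_residue`): the assertion `Common` carried over the
  segment's own stores (all of them into the scratch slots of the function's stack frame), and the pure facts about the
  32-bit counters `pass`, `ch`, `tap`.
-/

open X86 X86.User Asan Vorbis Vorbis.Spec Vorbis.Spec.DecodeResidue

set_option maxRecDepth 4000
set_option maxHeartbeats 4000000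

namespace Vorbis.Spec.decode_residue_3

/-- What a memory that differs from a cut point's memory inside the scratch window `[rbp − 0xf8, rbp − 0x90)` (the spill slots
below the protected frame and the return-address slot of a check call, where every store of this segment lies) only keeps: the footprint, the shadow,
`*f`, the temp block and every block the residue record reads. -/
structure ScratchKept (g : G) (m m' : Mem) : Prop where
  /-- the footprint of the contract -/
  same : Mem.SameExcept (g.spec.footprint g.e) g.e.mem m'
  /-- no shadow byte was written -/
  shadow : ShadowUntouched m m'
  /-- the decoder object reads the same -/
  obj : (objBlock g.f).Same m m'
  /-- the temp block reads the same -/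
  tb : g.TB.Kept m m'
  /-- every allocated block reads the same -/
  blk : AllKept g.Blk m m'

/-- **A batch of stores into the scratch slots** keeps the footprint, the shadow, `*f` and the temp block. -/
theorem kept_of_scratch {u₀ : State} {g : G} {v : State} {m' : Mem} (he : Entered u₀ g) (c : Common u₀ g v)
    (hst : Mem.SameExcept [⟨(g.e.reg .rsp).toNat - 256, (g.e.reg .rsp).toNat - 152⟩] v.mem m') : ScratchKept g v.mem m' := by
  have hroom := he.room
  have eR : (g.e.reg .rsp).toNat = g.RA := rfl
  have hobst := he.pre.free.offStack _ he.vorbis.obj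
  simp only [vblock, voff] at hobst
  have htb := c.point.busy.ok.tblock_off c.tblock
  refine ⟨?_, ?_, ?_, ?_, ?_⟩
  · -- the scratch window lies inside the frame's 848 bytes
    apply c.same.step_same hst
    intro w hw a h1 h2
    have e1 : w = ⟨(g.e.reg .rsp).toNat - 256, (g.e.reg .rsp).toNat - 152⟩ := List.mem_singleton.mp hw
    subst e1
    refine ⟨⟨(g.e.reg .rsp).toNat - 848, (g.e.reg .rsp).toNat⟩, ?_, ?_, ?_⟩
    · unfold Spec.footprint
      exact List.mem_cons_self ..
    · simp only [] at h1 h2 ⊢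
      omega
    · simp only [] at h1 h2 ⊢
      omega
  · -- the shadow region is far above the stack
    apply hst.eqOn
    intro w hw
    have e1 : w = ⟨(g.e.reg .rsp).toNat - 256, (g.e.reg .rsp).toNat - 152⟩ := List.mem_singleton.mp hw
    subst e1
    simp only []
    omega
  · -- `*f` is an allocated block: off the stack
    apply Block.Same.of_sameExcept hst
    intro w hw
    have e1 : w = ⟨(g.e.reg .rsp).toNat - 256, (g.e.reg .rsp).toNat - 152⟩ := List.mem_singleton.mp hw
    subst e1
    simp only [vblock, voff]
    omega
  · -- the temp block lies in the arena: off the stack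
    apply Block.Kept.of_sameExcept hst
    · intro w hw
      have e1 : w = ⟨(g.e.reg .rsp).toNat - 256, (g.e.reg .rsp).toNat - 152⟩ := List.mem_singleton.mp hw
      subst e1
      simp only []
      omega
    · omega
  · -- an allocated block is off the stack
    apply AllKept.of_sameExcept he.pre.env.ok hst
    intro B hB w hw
    have e1 : w = ⟨(g.e.reg .rsp).toNat - 256, (g.e.reg .rsp).toNat - 152⟩ := List.mem_singleton.mp hw
    subst e1
    have hoff := he.pre.free.offStack B hB
    simp only []
    omega

/-- **COMMON at the exit of a segment that only stored into the scratch slots**: the frame facts are given (the walker's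
`u_resolve`), everything else follows from `Common` of the segment's entry and `ScratchKept`. -/
theorem common_of_kept {u₀ : State} {g : G} {v v' : State} (he : Entered u₀ g) (c : Common u₀ g v)
    (hk : ScratchKept g v.mem v'.mem)
    (rbp : v'.reg .rbp = g.e.reg .rsp - 8) (rsp : v'.reg .rsp = g.e.reg .rsp - 248)
    (code : CodeOK u₀ v'.mem) (inv : abiInv v')
    (s_rbp : UInt64.ofNat (v'.mem.readLE (g.e.reg .rsp - 8) 8) = g.e.reg .rbp)
    (s_r15 : UInt64.ofNat (v'.mem.readLE (g.e.reg .rsp - 16) 8) = g.e.reg .r15)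
    (s_r14 : UInt64.ofNat (v'.mem.readLE (g.e.reg .rsp - 24) 8) = g.e.reg .r14)
    (s_r13 : UInt64.ofNat (v'.mem.readLE (g.e.reg .rsp - 32) 8) = g.e.reg .r13)
    (s_r12 : UInt64.ofNat (v'.mem.readLE (g.e.reg .rsp - 40) 8) = g.e.reg .r12)
    (s_rbx : UInt64.ofNat (v'.mem.readLE (g.e.reg .rsp - 48) 8) = g.e.reg .rbx)
    (fr_f : UInt64.ofNat (v'.mem.readLE (g.e.reg .rsp - 184) 8) = g.e.reg .rdi)
    (fr_rb : UInt64.ofNat (v'.mem.readLE (g.e.reg .rsp - 216) 8) = g.e.reg .rsi)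
    (fr_ch : v'.mem.readLE (g.e.reg .rsp - 156) 4 = g.ch)
    (fr_prd : v'.mem.readLE (g.e.reg .rsp - 196) 4 = g.PRD)
    (fr_w : v'.mem.readLE (g.e.reg .rsp - 200) 4 = g.W)
    (fr_rtype : v'.mem.readLE (g.e.reg .rsp - 232) 4 = g.rtype)
    (fr_pcd : v'.mem.readLE (g.e.reg .rsp - 176) 8 = g.TB.base)
    (fr_si : v'.mem.readLE (g.e.reg .rsp - 240) 8 = (g.RA - 152) / 8) : Common u₀ g v' := by
  have hbits : Bits g.Blk g.len v.mem g.f := c.point.vorbis.bits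
  have hobr := hbits.OBR
  simp only [voff] at hobr
  apply Common.of_frame he rbp rsp code inv s_rbp s_r15 s_r14 s_r13 s_r12 s_rbx fr_f fr_rb fr_ch fr_prd fr_w fr_rtype
    fr_pcd fr_si hk.same
  · -- the shadow layer
    exact c.shadow.untouched hk.shadow
  · -- `Bits`: the fields of `*f` read the same
    exact hbits.frame_fields (Bits.SameFields.of_same hk.obj)
  · -- the arena fields read the same
    apply c.point.busy.transfer
    exact ObjEq.of_same hk.obj (by simp only [voff]; omega) (by decide)
  · -- the row-pointer table
    apply c.tb.frame
    apply hk.tb.mono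
    · show g.TB.base ≤ g.TB.base
      omega
    · show g.TB.base + 8 * g.C ≤ g.TB.base + g.TB.size
      have := c.tb.size
      have h3 : g.C * (8 + 8 * g.PRD) = g.C * 8 + g.C * (8 * g.PRD) := Nat.mul_add _ _ _
      omega
  · -- μ reads `*f` only
    rw [mu_frame_obj (by omega) hk.obj]
    exact c.mu_le

/-- **FILL(0, KK) carried over the stores into the scratch slots** (entry 2: the rows filled by pass 0 are still filled when
the next pass starts). -/
theorem fill_of_kept {u₀ : State} {g : G} {v : State} {m' : Mem} (he : Entered u₀ g) (c : Common u₀ g v)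
    (hk : ScratchKept g v.mem m') (hC : 0 < g.C)
    (hfill : Fill v.mem g.f g.r g.TB g.C g.PRD 0 (Res.ceilDiv g.PRD g.W)) :
    Fill m' g.f g.r g.TB g.C g.PRD 0 (Res.ceilDiv g.PRD g.W) := by
  have hW := c.w_pos he
  have r1 := c.reads
  have r2 := (he.reads hk.same).1
  -- the record reads in `m'` as in `v.mem`: both read as at the entry
  have hrd : ResidueReads v.mem g.f m' g.f g.r := by
    constructor
    · rw [r2.begin, r1.begin]
    · rw [r2.end_, r1.end_]
    · rw [r2.part_size, r1.part_size]
    · rw [r2.classifications, r1.classifications]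
    · rw [r2.classbook, r1.classbook]
    · rw [r2.classdata, r1.classdata]
    · rw [r2.residue_books, r1.residue_books]
    · rw [r2.codebook_count, r1.codebook_count]
    · rw [r2.cbk, r1.cbk]
    · rw [r2.E, r1.E]
    · rw [r2.W, r1.W]
  apply hfill.frame hC (Res.ceilDiv_le_self hW) c.tb.size hk.tb hrd
  exact hk.blk _ (c.resAt he).R8a

/-! ### The 32-bit counters of the segment as numbers -/

/-- A 32-bit register write of a small number, in the form the assertions state a register. -/
theorem ofBV32_of_lt (n : Nat) (h : n < 2 ^ 32) : Word.ofBV (BitVec.ofNat 32 n) = UInt64.ofNat n := by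
  rw [ofBV_eq_addr _ (by decide), BitVec.toNat_ofNat, Nat.mod_eq_of_lt h]
  rfl

/-- `mov r15d, 0` as the assertions state it. -/
theorem ofBV32_zero : Word.ofBV 0#32 = UInt64.ofNat 0 := ofBV32_of_lt 0 (by decide)

/-- `temp_alloc_point = L` is a 32-bit number (AR1: the arena ends below the shadow). -/
theorem tap_lt {u₀ : State} {g : G} (he : Entered u₀ g) : g.tap < 2 ^ 32 := by
  have h1 := he.ado.ok.AR1
  unfold G.tap
  omega

/-- `ch` is a 32-bit number (it is the low half of rdx). -/
theorem ch_lt (g : G) : g.ch < 2 ^ 32 := by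
  unfold G.ch
  omega

/-- `ch ≤ channels ≤ 16` (P2, HD1). -/
theorem ch_le16 {u₀ : State} {g : G} (he : Entered u₀ g) : g.ch ≤ g.C ∧ g.C ≤ 16 := by
  have h1 := he.args.ch_le
  have h2 := (HeaderOK.HD1 he.vorbis.header).2
  have e : g.C = (stb_vorbis.channels g.e.mem g.f).toNat := nchan_def _ _
  have h1' : g.ch ≤ g.C := h1
  omega

/-- The eight values of `pass`. -/
theorem pass_cases (pass : Nat) (h : pass ≤ 7) :
    pass = 0 ∨ pass = 1 ∨ pass = 2 ∨ pass = 3 ∨ pass = 4 ∨ pass = 5 ∨ pass = 6 ∨ pass = 7 := by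
  omega

/-- `add DWORD PTR [rbp-0xa0], 1` stores `pass + 1` (no wrap: `pass ≤ 7`). -/
theorem pass_succ (pass : Nat) (h : pass ≤ 7) : (BitVec.ofNat 32 pass + 1#32).toNat = pass + 1 := by
  rcases pass_cases pass h with e | e | e | e | e | e | e | e <;> subst e <;> decide

/-- `cmp DWORD PTR [rbp-0xa0], 7 ; jg` taken after the add: `pass` was 7. -/
theorem pass_last (pass : Nat) (h : pass ≤ 7)
    (hbr : (7#32).toInt < (BitVec.ofNat 32 ((BitVec.ofNat 32 pass + 1#32).toNat % 4294967296)).toInt) : pass = 7 := by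
  rcases pass_cases pass h with e | e | e | e | e | e | e | e <;> subst e <;> first | rfl | exact absurd hbr (by decide)

/-- `cmp DWORD PTR [rbp-0xa0], 7 ; jg` not taken after the add: the next pass is at most 7. -/
theorem pass_next (pass : Nat) (h : pass ≤ 7)
    (hbr : ¬ (7#32).toInt < (BitVec.ofNat 32 ((BitVec.ofNat 32 pass + 1#32).toNat % 4294967296)).toInt) :
    pass + 1 ≤ 7 := by
  rcases pass_cases pass h with e | e | e | e | e | e | e | e <;> subst e <;> first | omega | exact absurd (by decide) hbr

/-- **`do_not_decode[0 .. ch)` is live inside the function** (P2, with the own frame pushed and the temp block allocated): the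
check site 0x10ef31. -/
theorem dndLiveIn {u₀ : State} {g : G} (he : Entered u₀ g) : LiveIn g.others' g.frames' g.dnd g.ch := by
  apply he.args.dnd_live.mono
  intro o ho
  unfold G.frames' G.others'
  rw [stackObjs_cons]
  rcases List.mem_append.mp ho with h | h
  · exact List.mem_append_left _ (List.mem_append_right _ h)
  · exact List.mem_append_right _ (List.mem_cons_of_mem _ h)

/-! ### The loop counter `j` (r12d) of loop 2157 as the walker sees it -/

/-- The low half of a register that holds a small number. -/
theorem part32_ofNat (n : Nat) (h : n < 2 ^ 32) : Word.part Width.w32 (UInt64.ofNat n) = BitVec.ofNat 32 n := by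
  apply BitVec.eq_of_toNat_eq
  have e : (UInt64.ofNat n).toNat = n := toNat_addr n (by omega)
  rw [Asan.part32_toNat, e, BitVec.toNat_ofNat]

/-- `movsxd` of a small non-negative number is the number. -/
theorem sx32_ofNat (n : Nat) (h : n < 2 ^ 31) :
    Word.ofBV (BitVec.signExtend 64 (BitVec.ofNat 32 n)) = UInt64.ofNat n := by
  apply UInt64.toNat_inj.mp
  have e : (UInt64.ofNat n).toNat = n := toNat_addr n (by omega)
  rw [toNat_sext32 _ (by rw [toNat_ofNat32 _ (by omega)]; exact h), toNat_ofNat32 _ (by omega), e]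

/-- A small non-negative number in a signed 32-bit compare is the number. -/
theorem toInt32_ofNat (n : Nat) (h : n < 2 ^ 31) : (BitVec.ofNat 32 n).toInt = (n : Int) := by
  rw [toInt_of_lt _ (by rw [toNat_ofNat32 _ (by omega)]; exact h), toNat_ofNat32 _ (by omega)]

/-- `add r12d, 1` of a small number. -/
theorem succ32_ofNat (n : Nat) (h : n + 1 < 2 ^ 32) :
    Word.ofBV (BitVec.ofNat 32 n + 1#32) = UInt64.ofNat (n + 1) := by
  have e : BitVec.ofNat 32 n + 1#32 = BitVec.ofNat 32 (n + 1) := by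
    apply BitVec.eq_of_toNat_eq
    rw [BitVec.toNat_add, BitVec.toNat_ofNat, BitVec.toNat_ofNat, BitVec.toNat_ofNat]
    omega
  rw [e]
  exact ofBV32_of_lt (n + 1) h

/-- `do_not_decode + j`: the address of the check site 0x10ef31 as a number. -/
theorem toNat_add_ofNat' (j : Nat) (w : Word) (h : w.toNat + j < 2 ^ 64) : (UInt64.ofNat j + w).toNat = w.toNat + j := by
  have e : (UInt64.ofNat j).toNat = j := toNat_addr j (by omega)
  rw [UInt64.toNat_add, e]
  omega

/-! ### The assertion between loop 2157 and the pass loop -/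

/-- 0x10ef41, the first instruction after loop 2157 (`mov r14,[rbp-0xb8]`): not a cut point of the image's tables, so it has
no name in Vorbis/Labels.lean; it is 30 bytes after the loop head. -/
abbrev afterLoop : Word := Vorbis.L.decode_residue.loop4 + 30

/-- **0x10ef41, `if (j == ch) goto done`**: what holds when loop 2157 `for (j=0; j < ch; ++j) if (!do_not_decode[j]) break;`
is left (through `jge` at 0x10ef26 or `je` at 0x10ef39). `v` is the state at the segment's entry 0x10ef08 (where `Common` is
known), `s` the present state: `r12d = j ≤ ch`; `r15d = tap`; `[rbp−0xb8] = r`; the frame slots of COMMON; nothing was stored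
but into the scratch window of the frame. -/
structure AfterJ (u₀ : State) (g : G) (v s : State) : Prop where
  rip : s.rip = afterLoop
  j : ∃ j : Nat, j ≤ g.ch ∧ s.reg .r12 = UInt64.ofNat j
  rbp : s.reg .rbp = g.e.reg .rsp - 8
  rsp : s.reg .rsp = g.e.reg .rsp - 248
  r15 : s.reg .r15 = UInt64.ofNat g.tap
  code : CodeOK u₀ s.mem
  inv : abiInv s
  same : Mem.SameExcept [⟨(g.e.reg .rsp).toNat - 256, (g.e.reg .rsp).toNat - 152⟩] v.mem s.mem
  /-- `[rbp−0xb8] = r`, spilled at 0x10ef0e -/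
  l_r : UInt64.ofNat (s.mem.readLE (g.e.reg .rsp - 192) 8) = UInt64.ofNat g.r
  /-- `[rbp−0xc8] = n` -/
  l_n : s.mem.readLE (g.e.reg .rsp - 208) 4 = g.n
  /-- the six saved registers -/
  l_rbp : UInt64.ofNat (s.mem.readLE (g.e.reg .rsp - 8) 8) = g.e.reg .rbp
  l_r15 : UInt64.ofNat (s.mem.readLE (g.e.reg .rsp - 16) 8) = g.e.reg .r15
  l_r14 : UInt64.ofNat (s.mem.readLE (g.e.reg .rsp - 24) 8) = g.e.reg .r14
  l_r13 : UInt64.ofNat (s.mem.readLE (g.e.reg .rsp - 32) 8) = g.e.reg .r13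
  l_r12 : UInt64.ofNat (s.mem.readLE (g.e.reg .rsp - 40) 8) = g.e.reg .r12
  l_rbx : UInt64.ofNat (s.mem.readLE (g.e.reg .rsp - 48) 8) = g.e.reg .rbx
  /-- the eight constant slots of FR -/
  l_f : UInt64.ofNat (s.mem.readLE (g.e.reg .rsp - 184) 8) = g.e.reg .rdi
  l_rb : UInt64.ofNat (s.mem.readLE (g.e.reg .rsp - 216) 8) = g.e.reg .rsi
  l_ch : s.mem.readLE (g.e.reg .rsp - 156) 4 = g.ch
  l_prd : s.mem.readLE (g.e.reg .rsp - 196) 4 = g.PRD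
  l_w : s.mem.readLE (g.e.reg .rsp - 200) 4 = g.W
  l_rtype : s.mem.readLE (g.e.reg .rsp - 232) 4 = g.rtype
  l_pcd : s.mem.readLE (g.e.reg .rsp - 176) 8 = g.TB.base
  l_si : s.mem.readLE (g.e.reg .rsp - 240) 8 = (g.RA - 152) / 8

end Vorbis.Spec.decode_residue_3
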